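-- pv_equiv track=rewrite | github.com/demir-huseyin/britishglobal | utils/form_processor.py | _determine_legal_urgency
-- ===== SOURCE A (Python) =====
-- from typing import Dict, Any, List
--
-- def _determine_legal_urgency(legal_data: Dict) -> str:
--     """Hukuk başvurusu aciliyet seviyesi"""
--
--     services = legal_data.get('selected_services', [])
--
--     if 'vize_red' in services:
--         return 'urgent'  # Vize reddi acil
--     elif 'turistik_vize' in services:
--         return 'high'  # Seyahat planları var olabilir
--     elif any(s in services for s in ['calisma_vize', 'ogrenci_vize']):
--         return 'high'  # Başvuru deadlineları var
--     else:
--         return 'medium'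
-- ===== SOURCE B (Python) =====
-- _PRIORITY = {
--     'vize_red': 3,       # visa refusal -> urgent
--     'turistik_vize': 2,  # tourist visa -> high
--     'calisma_vize': 2,   # work visa -> high
--     'ogrenci_vize': 2,   # student visa -> high
-- }
--
-- _LABEL = {3: 'urgent', 2: 'high', 0: 'medium'}
--
--
-- def _determine_legal_urgency(legal_data):
--     """Hukuk başvurusu aciliyet seviyesi"""
--     best = 0
--     for s in legal_data.get('selected_services', []):
--         p = _PRIORITY.get(s, 0)
--         if p > best:
--             best = p
--     return _LABEL[best]
-- ===== Notes on version B (the rewrite author's own statement) =====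
-- stated objective: idiomatic
-- what changed: Replaces A's fixed if/elif chain of membership tests against the services list by a prebuilt service-to-priority dict scanned once over the actual services, keeping the maximum priority and mapping it to its label at the end.
import Mathlib
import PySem

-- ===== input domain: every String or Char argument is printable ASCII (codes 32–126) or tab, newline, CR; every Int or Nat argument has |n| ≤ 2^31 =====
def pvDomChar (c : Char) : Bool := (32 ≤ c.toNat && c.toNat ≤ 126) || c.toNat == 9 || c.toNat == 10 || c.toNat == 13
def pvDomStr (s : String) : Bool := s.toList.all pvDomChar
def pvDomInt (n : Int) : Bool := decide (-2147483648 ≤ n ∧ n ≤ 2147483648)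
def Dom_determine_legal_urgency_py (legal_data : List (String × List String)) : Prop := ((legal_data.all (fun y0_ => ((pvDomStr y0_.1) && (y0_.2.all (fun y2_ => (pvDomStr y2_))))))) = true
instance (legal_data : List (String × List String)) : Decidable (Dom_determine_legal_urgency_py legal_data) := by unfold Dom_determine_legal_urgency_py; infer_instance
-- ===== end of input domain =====

-- B replaces A's fixed if/elif membership chain by a service→priority dict and a
-- max-priority scan over the actual services list (objective: idiomatic; same cost).

-- ===== PORT A =====
def determine_legal_urgency_py (legal_data : List (String × List String)) : String :=
  let services := (PySem.Dict.mk legal_data).getD "selected_services" []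
  if services.contains "vize_red" then "urgent"
  else if services.contains "turistik_vize" then "high"
  else if ["calisma_vize", "ogrenci_vize"].any (fun s => services.contains s) then "high"
  else "medium"

-- ===== PORT B =====
def pvPriority : PySem.Dict String Nat :=
  ⟨[("vize_red", 3), ("turistik_vize", 2), ("calisma_vize", 2), ("ogrenci_vize", 2)]⟩

def pvLabel : PySem.Dict Nat String := ⟨[(3, "urgent"), (2, "high"), (0, "medium")]⟩

-- loop body: p = _PRIORITY.get(s, 0); if p > best: best = p
def pvStep (best : Nat) (s : String) : Nat :=
  let p := pvPriority.getD s 0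
  if p > best then p else best

def determine_legal_urgency_py_alt (legal_data : List (String × List String)) : String :=
  let best := ((PySem.Dict.mk legal_data).getD "selected_services" []).foldl pvStep 0
  -- _LABEL[best]: best is always one of 0/2/3, so the lookup never fails; "" ports the unreachable KeyError
  (pvLabel.get? best).getD ""

-- ===== PRECONDITION & SPEC =====
def Spec_determine_legal_urgency_py (legal_data : List (String × List String)) (out : String) : Prop := out = determine_legal_urgency_py_alt legal_data
instance (legal_data : List (String × List String)) (out : String) : Decidable (Spec_determine_legal_urgency_py legal_data out) := by unfold Spec_determine_legal_urgency_py; infer_instance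

-- ===== CLAIM (what is proved, stated in full; the proofs are below) =====
def Claim_equal_determine_legal_urgency_py : Prop := ∀ (legal_data : List (String × List String)), Dom_determine_legal_urgency_py legal_data → Spec_determine_legal_urgency_py legal_data (determine_legal_urgency_py legal_data)

-- ===== LEMMAS AND PROOFS =====

-- maximum priority of a service list, in closed form
def pvTarget (l : List String) : Nat :=
  if l.contains "vize_red" then 3
  else if l.contains "turistik_vize" || l.contains "calisma_vize" || l.contains "ogrenci_vize" then 2
  else 0

lemma pvTarget_le (l : List String) : pvTarget l ≤ 3 := by
  unfold pvTarget; split_ifs <;> omega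

lemma pvPrio_eval (s : String) : pvPriority.getD s 0 =
    (if "vize_red" == s then 3 else if "turistik_vize" == s then 2
     else if "calisma_vize" == s then 2 else if "ogrenci_vize" == s then 2 else 0) := by
  simp only [pvPriority, PySem.Dict.getD, PySem.Dict.get?_mk_cons]
  cases h1 : ("vize_red" == s) <;> cases h2 : ("turistik_vize" == s) <;>
    cases h3 : ("calisma_vize" == s) <;> cases h4 : ("ogrenci_vize" == s) <;> rfl

lemma pvStep_max (acc : Nat) (s : String) : pvStep acc s = max acc (pvPriority.getD s 0) := by
  have h : pvStep acc s = if pvPriority.getD s 0 > acc then pvPriority.getD s 0 else acc := rfl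
  rw [h]; split_ifs <;> omega

lemma pvTarget_cons (s : String) (t : List String) :
    pvTarget (s :: t) = max (pvPriority.getD s 0) (pvTarget t) := by
  have ht := pvTarget_le t
  rw [pvPrio_eval]
  unfold pvTarget at ht ⊢
  rw [List.contains_cons, List.contains_cons, List.contains_cons, List.contains_cons]
  cases h1 : ("vize_red" == s) <;> cases h2 : ("turistik_vize" == s) <;>
    cases h3 : ("calisma_vize" == s) <;> cases h4 : ("ogrenci_vize" == s) <;>
    simp only [Bool.true_or, Bool.false_or, Bool.or_true] <;>
    split_ifs at * <;> omega

lemma pvFold_target (l : List String) : ∀ acc : Nat, l.foldl pvStep acc = max acc (pvTarget l) := by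
  induction l with
  | nil => intro acc; simp [pvTarget]
  | cons s t ih =>
    intro acc
    rw [List.foldl_cons, ih, pvStep_max, pvTarget_cons]
    omega

lemma pvKey (l : List String) :
    (if l.contains "vize_red" then "urgent"
     else if l.contains "turistik_vize" then "high"
     else if ["calisma_vize", "ogrenci_vize"].any (fun s => l.contains s) then "high"
     else "medium")
    = (pvLabel.get? (l.foldl pvStep 0)).getD "" := by
  have hf := pvFold_target l 0
  simp only [Nat.zero_max] at hf
  rw [hf]
  unfold pvTarget
  simp only [List.any_cons, List.any_nil, Bool.or_false]
  cases c1 : l.contains "vize_red" <;> cases c2 : l.contains "turistik_vize" <;>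
    cases c3 : l.contains "calisma_vize" <;> cases c4 : l.contains "ogrenci_vize" <;> rfl

-- ===== VERDICT (by name: the statement is the Claim_ definition above) =====
theorem determine_legal_urgency_py_spec : Claim_equal_determine_legal_urgency_py := by
  intro legal_data _
  unfold Spec_determine_legal_urgency_py determine_legal_urgency_py determine_legal_urgency_py_alt
  exact pvKey ((PySem.Dict.mk legal_data).getD "selected_services" [])
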